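-- pv_equiv track=rewrite | github.com/norzest/Python_basic | Programmers/고득점Kit/Heap3.py | solution
-- ===== SOURCE A (Python) =====
-- import heapq
--
-- def solution(operations):
--     answer = []
--
--     for i in operations:
--         if i == 'D 1' and answer:
--             answer = [-i for i in answer]
--             heapq.heapify(answer)
--             heapq.heappop(answer)
--             answer = [-i for i in answer]
--             heapq.heapify(answer)
--         elif i == 'D -1' and answer:
--             heapq.heappop(answer)
--         elif i[0] == 'I':
--             heapq.heappush(answer, int(i[2:]))
--
--     try:
--         return [max(answer), min(answer)]
--     except:
--         return [0, 0]
-- ===== SOURCE B (Python) =====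
-- def solution(operations):
--     # Keep the multiset as a sorted list: insert in order, delete from the ends.
--     data = []
--     for op in operations:
--         if op == 'D 1':
--             if data:
--                 data.pop()
--         elif op == 'D -1':
--             if data:
--                 data.pop(0)
--         elif op[0] == 'I':
--             v = int(op[2:])
--             i = 0
--             while i < len(data) and data[i] <= v:
--                 i += 1
--             data.insert(i, v)
--     return [data[-1], data[0]] if data else [0, 0]
-- ===== Notes on version B (the rewrite author's own statement) =====
-- stated objective: simpler
-- what changed: A maintains a heapq binary heap and deletes the maximum by negating the whole list, re-heapifying, popping and re-heapifying again; B keeps the multiset as a sorted list (linear ordered insert), so delete-min is pop(0), delete-max is pop(), and the answer is just the two ends.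
import Mathlib
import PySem

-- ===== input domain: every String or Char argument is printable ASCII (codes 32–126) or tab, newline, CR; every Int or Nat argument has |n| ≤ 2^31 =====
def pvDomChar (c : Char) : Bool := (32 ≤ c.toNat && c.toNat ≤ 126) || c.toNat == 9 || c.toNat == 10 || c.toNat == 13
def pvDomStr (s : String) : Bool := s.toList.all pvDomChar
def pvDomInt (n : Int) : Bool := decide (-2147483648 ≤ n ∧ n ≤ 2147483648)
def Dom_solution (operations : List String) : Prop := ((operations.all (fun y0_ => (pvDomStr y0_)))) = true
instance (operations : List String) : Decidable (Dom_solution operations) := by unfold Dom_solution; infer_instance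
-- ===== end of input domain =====

-- B keeps the multiset as a sorted list (insert in order, delete at the ends) instead of A's
-- heapq juggling with double negate+heapify on every max-deletion; same return value.

-- ===== PORT A =====
-- literal port of CPython heapq._siftdown's while loop (heap[pos]=parent writes; final heap[pos]=newitem in pvSiftdown)
def pvSiftdownLoop (startpos : Nat) (newitem : Int) (heap : List Int) (pos : Nat) : List Int × Nat :=
  if _h : startpos < pos then
    let parentpos := (pos - 1) / 2
    let parent := heap.getD parentpos 0
    if newitem < parent then pvSiftdownLoop startpos newitem (heap.set pos parent) parentpos
    else (heap, pos)
  else (heap, pos)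
  termination_by pos
  decreasing_by omega

-- heapq._siftdown(heap, startpos, pos) (newitem = heap[pos]; indices are always in range when A calls it)
def pvSiftdown (heap : List Int) (startpos pos : Nat) : List Int :=
  let newitem := heap.getD pos 0
  match pvSiftdownLoop startpos newitem heap pos with
  | (h, p) => h.set p newitem

-- heapq._siftup's while loop: move the smaller child up until a leaf is reached
def pvSiftupLoop (heap : List Int) (pos : Nat) : List Int × Nat :=
  if _h : 2 * pos + 1 < heap.length then
    let childpos :=
      if 2 * pos + 2 < heap.length && !(heap.getD (2 * pos + 1) 0 < heap.getD (2 * pos + 2) 0)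
      then 2 * pos + 2 else 2 * pos + 1
    pvSiftupLoop (heap.set pos (heap.getD childpos 0)) childpos
  else (heap, pos)
  termination_by heap.length - pos
  decreasing_by simp only [List.length_set]; split <;> omega

-- heapq._siftup(heap, pos): descend the hole, put newitem at the leaf, then _siftdown back up
def pvSiftup (heap : List Int) (pos : Nat) : List Int :=
  let newitem := heap.getD pos 0
  match pvSiftupLoop heap pos with
  | (h, p) => pvSiftdown (h.set p newitem) pos p

-- heapq.heapify(x): for i in reversed(range(len(x)//2)): _siftup(x, i)
def pvHeapify (x : List Int) : List Int :=
  (List.range (x.length / 2)).reverse.foldl (fun h i => pvSiftup h i) x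

-- heapq.heappush(heap, item): heap.append(item); _siftdown(heap, 0, len(heap)-1)
def pvHeappush (heap : List Int) (item : Int) : List Int :=
  pvSiftdown (heap ++ [item]) 0 heap.length

-- heapq.heappop(heap), keeping only the remaining list (A discards the popped value).
-- Python raises IndexError on an empty heap; A only calls it on a non-empty list (guarded by `and answer`).
def pvHeappopRest (heap : List Int) : List Int :=
  let lastelt := heap.getLastD 0
  let rest := heap.dropLast
  if rest.isEmpty then [] else pvSiftup (rest.set 0 lastelt) 0

-- one iteration of A's for-loop (int(i[2:]) is guaranteed to parse by Pre_; getD 0 is never the raising case there)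
def pvStepA (answer : List Int) (i : String) : List Int :=
  if i == "D 1" && !answer.isEmpty then
    pvHeapify ((pvHeappopRest (pvHeapify (answer.map (fun x => -x)))).map (fun x => -x))
  else if i == "D -1" && !answer.isEmpty then pvHeappopRest answer
  else if PySem.Str.pyGet? i 0 == some 'I' then
    pvHeappush answer ((PySem.Int.ofStr? (PySem.Str.slice i (some 2) none)).getD 0)
  else answer

def solution (operations : List String) : List Int :=
  let answer := operations.foldl pvStepA []
  match PySem.List.max? answer (fun x => x), PySem.List.min? answer (fun x => x) with
  | some mx, some mn => [mx, mn]
  | _, _ => [0, 0]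

-- ===== PORT B =====
-- Source B's while-loop linear insertion into the sorted list (insert after equal elements)
def pvInsort (data : List Int) (v : Int) : List Int :=
  match data with
  | [] => [v]
  | x :: xs => if x ≤ v then x :: pvInsort xs v else v :: x :: xs

def pvStepB (data : List Int) (op : String) : List Int :=
  if op == "D 1" then data.dropLast
  else if op == "D -1" then data.tail
  else if PySem.Str.pyGet? op 0 == some 'I' then
    pvInsort data ((PySem.Int.ofStr? (PySem.Str.slice op (some 2) none)).getD 0)
  else data

def solution_alt (operations : List String) : List Int :=
  let data := operations.foldl pvStepB []
  if data.isEmpty then [0, 0] else [data.getLastD 0, data.headD 0]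

-- ===== PRECONDITION & SPEC =====
-- Pre_ excludes exactly the inputs on which A raises: an empty operation string (IndexError on i[0])
-- or an operation starting with 'I' whose tail i[2:] is not a valid int literal (ValueError in int()).
def Pre_solution (operations : List String) : Prop :=
  ∀ s ∈ operations, s ≠ "" ∧ (PySem.Str.pyGet? s 0 = some 'I' →
    (PySem.Int.ofStr? (PySem.Str.slice s (some 2) none)).isSome = true)
instance (operations : List String) : Decidable (Pre_solution operations) := by
  unfold Pre_solution; infer_instance

def pvWitness_solution : List String := ["I 5", "I 3", "D -1", "I 7", "D 1"]

def Spec_solution (operations : List String) (out : List Int) : Prop := out = solution_alt operations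
instance (operations : List String) (out : List Int) : Decidable (Spec_solution operations out) := by
  unfold Spec_solution; infer_instance

-- ===== CLAIM (what is proved, stated in full; the proofs are below) =====
def Claim_equal_solution : Prop := ∀ (operations : List String), Dom_solution operations → Pre_solution operations → Spec_solution operations (solution operations)

-- ===== LEMMAS AND PROOFS =====

theorem pvGetD_set (l : List Int) (i j : Nat) (a : Int) (h : i < l.length) :
    (l.set i a).getD j 0 = if i = j then a else l.getD j 0 := by
  simp only [List.getD_eq_getElem?_getD, List.getElem?_set, h, if_true]
  split <;> rfl

theorem pvSet_getD_self (l : List Int) (i : Nat) (h : i < l.length) : l.set i (l.getD i 0) = l := by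
  have hg : l.getD i 0 = l[i] := by simp [List.getD_eq_getElem?_getD, List.getElem?_eq_getElem h]
  rw [hg, List.set_getElem_self]

theorem pvSwap_perm (l : List Int) (i j : Nat) (hi : i < l.length) (hj : j < l.length)
    (hij : i ≠ j) : ((l.set i (l.getD j 0)).set j (l.getD i 0)).Perm l := by
  rw [List.perm_iff_count]
  intro b
  rw [List.count_set (by simpa using hj), List.count_set hi]
  have hgi : l.getD i 0 = l[i] := by simp [List.getD_eq_getElem?_getD, List.getElem?_eq_getElem hi]
  have hgj : l.getD j 0 = l[j] := by simp [List.getD_eq_getElem?_getD, List.getElem?_eq_getElem hj]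
  have h1 : (l.set i (l.getD j 0))[j]'(by simpa using hj) = l[j] := by
    rw [List.getElem_set]; simp [hij]
  have hci : l[i] = b → 1 ≤ List.count b l := fun e => List.count_pos_iff.mpr (e ▸ List.getElem_mem hi)
  have hcj : l[j] = b → 1 ≤ List.count b l := fun e => List.count_pos_iff.mpr (e ▸ List.getElem_mem hj)
  rw [h1, hgi, hgj]
  by_cases e1 : l[i] = b <;> by_cases e2 : l[j] = b <;>
    simp [e1, e2] <;> omega
def pvDesc (s p : Nat) : Bool :=
  if p ≤ s then p == s else pvDesc s ((p - 1) / 2)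
  termination_by p
  decreasing_by omega

theorem pvDesc_self (s : Nat) : pvDesc s s = true := by
  rw [pvDesc]; simp

theorem pvDesc_le (s p : Nat) (h : pvDesc s p = true) : s ≤ p := by
  rw [pvDesc] at h
  split at h
  · simp at h; omega
  · omega

theorem pvDesc_parent (s p : Nat) (h : pvDesc s p = true) (hlt : s < p) :
    pvDesc s ((p - 1) / 2) = true := by
  rw [pvDesc] at h
  split at h
  · omega
  · exact h

theorem pvDesc_child (s p c : Nat) (h : pvDesc s p = true) (hc : (c - 1) / 2 = p) (hcp : p < c) :
    pvDesc s c = true := by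
  have hs := pvDesc_le s p h
  rw [pvDesc]
  split
  · omega
  · rw [hc]; exact h

theorem pvDesc_zero (p : Nat) : pvDesc 0 p = true := by
  induction p using Nat.strong_induction_on with
  | _ p ih =>
    rw [pvDesc]
    split
    · simp; omega
    · exact ih _ (by omega)

theorem pvSiftdownLoop_spec (s : Nat) (newitem : Int) :
    ∀ pos heap, pos < (heap : List Int).length → pvDesc s pos = true →
    (∀ i, 0 < i → i < heap.length → i ≠ pos → s ≤ (i-1)/2 →
       (heap.set pos newitem).getD ((i-1)/2) 0 ≤ (heap.set pos newitem).getD i 0) →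
    (s < pos → ∀ c, c < heap.length → (c-1)/2 = pos →
       (heap.set pos newitem).getD ((pos-1)/2) 0 ≤ (heap.set pos newitem).getD c 0) →
    ((pvSiftdownLoop s newitem heap pos).1.set (pvSiftdownLoop s newitem heap pos).2 newitem).Perm (heap.set pos newitem)
    ∧ (pvSiftdownLoop s newitem heap pos).1.length = heap.length
    ∧ (pvSiftdownLoop s newitem heap pos).2 < heap.length
    ∧ (∀ i, 0 < i → i < heap.length → s ≤ (i-1)/2 →
        ((pvSiftdownLoop s newitem heap pos).1.set (pvSiftdownLoop s newitem heap pos).2 newitem).getD ((i-1)/2) 0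
        ≤ ((pvSiftdownLoop s newitem heap pos).1.set (pvSiftdownLoop s newitem heap pos).2 newitem).getD i 0) := by
  intro pos
  induction pos using Nat.strong_induction_on with
  | _ pos ih =>
    intro heap hlen hdesc hi hii
    have hA : ∀ j, (heap.set pos newitem).getD j 0 =
        if pos = j then newitem else heap.getD j 0 := fun j => pvGetD_set _ _ _ _ hlen
    rw [pvSiftdownLoop]
    by_cases hsp : s < pos
    · simp only [hsp, reduceDIte]
      by_cases hcmp : newitem < heap.getD ((pos - 1) / 2) 0
      · simp only [hcmp, if_true]
        have hpp : (pos - 1) / 2 < pos := by omega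
        have hppne : (pos - 1) / 2 ≠ pos := by omega
        have hA' : ∀ j, ((heap.set pos (heap.getD ((pos - 1) / 2) 0)).set ((pos - 1) / 2) newitem).getD j 0 =
            if (pos - 1) / 2 = j then newitem
            else if pos = j then heap.getD ((pos - 1) / 2) 0 else heap.getD j 0 := by
          intro j
          rw [pvGetD_set _ _ _ _ (by simp; omega), pvGetD_set _ _ _ _ hlen]
        have ihh := ih ((pos - 1) / 2) hpp (heap.set pos (heap.getD ((pos - 1) / 2) 0))
          (by simp; omega) (pvDesc_parent _ _ hdesc hsp) ?_ ?_
        · refine ⟨?_, ?_, ?_, ?_⟩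
          · refine ihh.1.trans ?_
            have hswap := pvSwap_perm (heap.set pos newitem) pos ((pos - 1) / 2)
              (by simpa using hlen) (by simp; omega) (by omega)
            have e1 : (heap.set pos newitem).getD ((pos - 1) / 2) 0 = heap.getD ((pos - 1) / 2) 0 := by
              rw [hA]; simp [Ne.symm hppne]
            have e2 : (heap.set pos newitem).getD pos 0 = newitem := by rw [hA]; simp
            rw [e1, e2, List.set_set] at hswap
            exact hswap
          · simpa using ihh.2.1
          · simpa using ihh.2.2.1
          · intro i h0 hilen hspar
            exact ihh.2.2.2 i h0 (by simpa using hilen) hspar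
        · -- invariant (i) for the recursive call
          intro i h0 hilen hine hspar
          simp only [List.length_set] at hilen
          rw [hA' i, hA' ((i-1)/2)]
          by_cases hip : i = pos
          · subst hip
            simp only [Ne.symm hine, if_false]
            exact le_of_lt hcmp
          · by_cases hpip : (i-1)/2 = pos
            · rw [if_neg (by omega), if_neg (by omega : ¬ (pos-1)/2 = i), if_neg (Ne.symm hip)]
              rw [hpip, if_pos rfl]
              have := hii hsp i hilen hpip
              rw [hA, hA] at this
              rw [if_neg (Ne.symm hppne), if_neg (Ne.symm hip)] at this
              exact this
            · by_cases hpipp : (i-1)/2 = (pos-1)/2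
              · rw [hpipp, if_pos rfl, if_neg (by omega : ¬ (pos-1)/2 = i), if_neg (Ne.symm hip)]
                have := hi i h0 hilen hip hspar
                rw [hA, hA] at this
                rw [hpipp, if_neg (Ne.symm hppne), if_neg (Ne.symm hip)] at this
                exact le_trans (le_of_lt hcmp) this
              · rw [if_neg (by omega), if_neg (by omega), if_neg (by omega : ¬ (pos-1)/2 = i),
                    if_neg (Ne.symm hip)]
                have := hi i h0 hilen hip hspar
                rw [hA, hA] at this
                rw [if_neg (by omega), if_neg (Ne.symm hip)] at this
                exact this
        · -- invariant (ii) for the recursive call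
          intro hspp c hclen hcpar
          simp only [List.length_set] at hclen
          have hsppar : s ≤ ((pos-1)/2 - 1) / 2 :=
            pvDesc_le _ _ (pvDesc_parent _ _ (pvDesc_parent _ _ hdesc hsp) hspp)
          have hpparne : ((pos-1)/2 - 1) / 2 ≠ (pos-1)/2 := by omega
          have hpparnepos : ((pos-1)/2 - 1) / 2 ≠ pos := by omega
          rw [hA' (((pos-1)/2 - 1) / 2), if_neg (Ne.symm hpparne), if_neg (by omega : ¬ pos = ((pos-1)/2 - 1) / 2)]
          have hmid : heap.getD (((pos-1)/2 - 1) / 2) 0 ≤ heap.getD ((pos-1)/2) 0 := by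
            have := hi ((pos-1)/2) (by omega) (by omega) hppne hsppar
            rw [hA, hA] at this
            rw [if_neg (Ne.symm hpparnepos), if_neg (Ne.symm hppne)] at this
            exact this
          rw [hA' c]
          by_cases hcpos : c = pos
          · subst hcpos
            rw [if_neg (by omega), if_pos rfl]
            exact hmid
          · have hcne : c ≠ (pos-1)/2 := by omega
            rw [if_neg (Ne.symm hcne), if_neg (Ne.symm hcpos)]
            refine le_trans hmid ?_
            have := hi c (by omega) hclen hcpos (by omega)
            rw [hA, hA] at this
            rw [hcpar, if_neg (Ne.symm hppne), if_neg (Ne.symm hcpos)] at this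
            exact this
      · -- exit: parent ≤ newitem
        simp only [hcmp, if_false]
        refine ⟨?_, ?_, ?_, ?_⟩
        · exact List.Perm.refl _
        · trivial
        · exact hlen
        intro i h0 hilen hspar
        by_cases hip : i = pos
        · subst hip
          rw [hA, hA, if_neg (by omega : ¬ i = (i-1)/2), if_pos rfl]
          omega
        · exact hi i h0 hilen hip hspar
    · -- pos ≤ s: pvDesc forces pos = s
      simp only [hsp, reduceDIte]
      have hps : pos = s := by have := pvDesc_le s pos hdesc; omega
      refine ⟨?_, ?_, ?_, ?_⟩
      · exact List.Perm.refl _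
      · trivial
      · exact hlen
      intro i h0 hilen hspar
      by_cases hip : i = pos
      · subst hip; omega
      · exact hi i h0 hilen hip hspar
theorem pvSiftdown_spec (heap : List Int) (s pos : Nat)
    (hlen : pos < heap.length) (hdesc : pvDesc s pos = true)
    (hi : ∀ i, 0 < i → i < heap.length → i ≠ pos → s ≤ (i-1)/2 →
       heap.getD ((i-1)/2) 0 ≤ heap.getD i 0)
    (hii : s < pos → ∀ c, c < heap.length → (c-1)/2 = pos →
       heap.getD ((pos-1)/2) 0 ≤ heap.getD c 0) :
    (pvSiftdown heap s pos).Perm heap ∧ (pvSiftdown heap s pos).length = heap.length ∧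
    (∀ i, 0 < i → i < heap.length → s ≤ (i-1)/2 →
       (pvSiftdown heap s pos).getD ((i-1)/2) 0 ≤ (pvSiftdown heap s pos).getD i 0) := by
  have hself : heap.set pos (heap.getD pos 0) = heap := pvSet_getD_self _ _ hlen
  have h := pvSiftdownLoop_spec s (heap.getD pos 0) pos heap hlen hdesc
    (by rw [hself]; exact hi) (by rw [hself]; exact hii)
  rw [hself] at h
  simp only [pvSiftdown]
  rcases hres : pvSiftdownLoop s (heap.getD pos 0) heap pos with ⟨h1, p1⟩
  rw [hres] at h
  exact ⟨h.1, by simpa using h.2.1, h.2.2.2⟩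
theorem pvSiftupLoop_spec (s : Nat) (n : Nat) :
    ∀ pos heap, (heap : List Int).length - pos ≤ n → pos < heap.length → pvDesc s pos = true →
    (∀ i, 0 < i → i < heap.length → i ≠ pos → (i-1)/2 ≠ pos → s ≤ (i-1)/2 →
        heap.getD ((i-1)/2) 0 ≤ heap.getD i 0) →
    (s < pos → ∀ c, c < heap.length → (c-1)/2 = pos →
        heap.getD ((pos-1)/2) 0 ≤ heap.getD c 0) →
    (pvSiftupLoop heap pos).1.length = heap.length
    ∧ (pvSiftupLoop heap pos).2 < heap.length
    ∧ pvDesc s (pvSiftupLoop heap pos).2 = true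
    ∧ heap.length ≤ 2 * (pvSiftupLoop heap pos).2 + 1
    ∧ (∀ newitem : Int,
        ((pvSiftupLoop heap pos).1.set (pvSiftupLoop heap pos).2 newitem).Perm (heap.set pos newitem))
    ∧ (∀ i, 0 < i → i < heap.length → i ≠ (pvSiftupLoop heap pos).2 →
        (i-1)/2 ≠ (pvSiftupLoop heap pos).2 → s ≤ (i-1)/2 →
        (pvSiftupLoop heap pos).1.getD ((i-1)/2) 0 ≤ (pvSiftupLoop heap pos).1.getD i 0) := by
  induction n with
  | zero =>
    intro pos heap hn hlen
    omega
  | succ n ihn =>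
    intro pos heap hn hlen hdesc hj hk
    rw [pvSiftupLoop]
    by_cases hch : 2 * pos + 1 < heap.length
    · simp only [hch, reduceDIte]
      have main : ∀ c : Nat, (c-1)/2 = pos → pos < c → c < heap.length →
          (∀ d, 0 < d → d < heap.length → (d-1)/2 = pos → heap.getD c 0 ≤ heap.getD d 0) →
          (pvSiftupLoop (heap.set pos (heap.getD c 0)) c).1.length = heap.length
          ∧ (pvSiftupLoop (heap.set pos (heap.getD c 0)) c).2 < heap.length
          ∧ pvDesc s (pvSiftupLoop (heap.set pos (heap.getD c 0)) c).2 = true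
          ∧ heap.length ≤ 2 * (pvSiftupLoop (heap.set pos (heap.getD c 0)) c).2 + 1
          ∧ (∀ newitem : Int,
              ((pvSiftupLoop (heap.set pos (heap.getD c 0)) c).1.set
                (pvSiftupLoop (heap.set pos (heap.getD c 0)) c).2 newitem).Perm (heap.set pos newitem))
          ∧ (∀ i, 0 < i → i < heap.length → i ≠ (pvSiftupLoop (heap.set pos (heap.getD c 0)) c).2 →
              (i-1)/2 ≠ (pvSiftupLoop (heap.set pos (heap.getD c 0)) c).2 → s ≤ (i-1)/2 →
              (pvSiftupLoop (heap.set pos (heap.getD c 0)) c).1.getD ((i-1)/2) 0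
              ≤ (pvSiftupLoop (heap.set pos (heap.getD c 0)) c).1.getD i 0) := by
        intro c hcpar hposc hclt hcmin
        have hH' : ∀ j, (heap.set pos (heap.getD c 0)).getD j 0 =
            if pos = j then heap.getD c 0 else heap.getD j 0 := fun j => pvGetD_set _ _ _ _ hlen
        have ih := ihn c (heap.set pos (heap.getD c 0)) (by simp; omega) (by simp; omega)
          (pvDesc_child s pos c hdesc hcpar hposc) ?_ ?_
        · obtain ⟨l1, l2, l3, l4, l5, l6⟩ := ih
          simp only [List.length_set] at l1 l2 l4
          refine ⟨l1, l2, l3, l4, ?_, ?_⟩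
          · intro newitem
            refine (l5 newitem).trans ?_
            have hswap := pvSwap_perm (heap.set pos newitem) pos c
              (by simpa using hlen) (by simpa using hclt) (by omega)
            have e1 : (heap.set pos newitem).getD c 0 = heap.getD c 0 := by
              rw [pvGetD_set _ _ _ _ hlen, if_neg (by omega)]
            have e2 : (heap.set pos newitem).getD pos 0 = newitem := by
              rw [pvGetD_set _ _ _ _ hlen, if_pos rfl]
            rw [e1, e2, List.set_set] at hswap
            exact hswap
          · intro i h0 hilen hine hipne hspar
            exact l6 i h0 (by simpa using hilen) hine hipne hspar
        · -- edge invariant for the recursive call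
          intro i h0 hilen hine hipne hspar
          simp only [List.length_set] at hilen
          rw [hH', hH']
          by_cases hip : i = pos
          · subst hip
            rw [if_neg (by omega : ¬ i = (i-1)/2), if_pos rfl]
            have hsp : s < i := by
              have := pvDesc_le s i hdesc; omega
            have := hk hsp c hclt hcpar
            exact this
          · by_cases hpip : (i-1)/2 = pos
            · rw [hpip, if_pos rfl, if_neg (Ne.symm hip)]
              exact hcmin i h0 hilen hpip
            · rw [if_neg (fun h => hpip h.symm), if_neg (Ne.symm hip)]
              exact hj i h0 hilen hip hpip hspar
        · -- grandchild invariant for the recursive call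
          intro hsc' d hdlen hdpar
          simp only [List.length_set] at hdlen
          rw [hH', hH']
          rw [if_pos hcpar.symm, if_neg (by omega : ¬ pos = d)]
          have := hj d (by omega) hdlen (by omega) (by omega) (by omega)
          rw [hdpar] at this
          exact this
      by_cases hcond : (2*pos+2 < heap.length
          && !(heap.getD (2*pos+1) 0 < heap.getD (2*pos+2) 0)) = true
      · simp only [hcond, if_true]
        simp only [Bool.and_eq_true, Bool.not_eq_eq_eq_not, Bool.not_true, decide_eq_true_eq,
          decide_eq_false_iff_not, not_lt] at hcond
        refine main (2*pos+2) (by omega) (by omega) hcond.1 ?_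
        intro d hd0 hdlen hdpar
        have : d = 2*pos+1 ∨ d = 2*pos+2 := by omega
        rcases this with h | h <;> subst h
        · exact hcond.2
        · exact le_refl _
      · simp only [hcond]
        simp only [Bool.and_eq_true, Bool.not_eq_eq_eq_not, Bool.not_true, decide_eq_true_eq,
          decide_eq_false_iff_not, not_lt, not_and] at hcond
        refine main (2*pos+1) (by omega) (by omega) hch ?_
        intro d hd0 hdlen hdpar
        have : d = 2*pos+1 ∨ d = 2*pos+2 := by omega
        rcases this with h | h <;> subst h
        · exact le_refl _
        · have := hcond hdlen
          omega
    · simp only [hch, reduceDIte]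
      refine ⟨?_, ?_, ?_, ?_, ?_, ?_⟩
      · trivial
      · exact hlen
      · exact hdesc
      · omega
      · intro newitem; exact List.Perm.refl _
      · exact hj
theorem pvSiftup_spec (heap : List Int) (s : Nat) (hs : s < heap.length)
    (hj : ∀ i, 0 < i → i < heap.length → s < (i-1)/2 →
        heap.getD ((i-1)/2) 0 ≤ heap.getD i 0) :
    (pvSiftup heap s).Perm heap ∧ (pvSiftup heap s).length = heap.length ∧
    (∀ i, 0 < i → i < heap.length → s ≤ (i-1)/2 →
        (pvSiftup heap s).getD ((i-1)/2) 0 ≤ (pvSiftup heap s).getD i 0) := by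
  have hl := pvSiftupLoop_spec s heap.length s heap (by omega) hs (pvDesc_self s)
    (fun i h0 hilen hine hipne hspar => hj i h0 hilen (by omega))
    (fun h => absurd h (lt_irrefl s))
  obtain ⟨l1, l2, l3, l4, l5, l6⟩ := hl
  simp only [pvSiftup]
  rcases hres : pvSiftupLoop heap s with ⟨h1, p1⟩
  rw [hres] at l1 l2 l3 l4 l5 l6
  simp only at l1 l2 l3 l4 l5 l6
  have hlen1 : p1 < h1.length := by omega
  have hsd := pvSiftdown_spec (h1.set p1 (heap.getD s 0)) s p1
    (by simpa using hlen1) l3 ?_ ?_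
  · have hperm : (h1.set p1 (heap.getD s 0)).Perm heap := by
      have := l5 (heap.getD s 0)
      rwa [pvSet_getD_self heap s hs] at this
    have hlenL : (h1.set p1 (heap.getD s 0)).length = heap.length := by simpa using l1
    refine ⟨hsd.1.trans hperm, by rw [hsd.2.1, hlenL], ?_⟩
    intro i h0 hilen hspar
    exact hsd.2.2 i h0 (by rw [hlenL]; exact hilen) hspar
  · -- edges of the intermediate list, away from p1
    intro i h0 hilen hine hspar
    simp only [List.length_set] at hilen
    have hipne : (i-1)/2 ≠ p1 := by omega
    have hL : ∀ j, (h1.set p1 (heap.getD s 0)).getD j 0 =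
        if p1 = j then heap.getD s 0 else h1.getD j 0 := fun j => pvGetD_set _ _ _ _ hlen1
    rw [hL, hL, if_neg (Ne.symm hipne), if_neg (Ne.symm hine)]
    exact l6 i h0 (by omega) hine hipne hspar
  · intro hsp1 c hclen hcpar
    simp only [List.length_set] at hclen
    omega
def pvIsHeap (l : List Int) : Prop :=
  ∀ i, 0 < i → i < l.length → l.getD ((i-1)/2) 0 ≤ l.getD i 0

theorem pvHeapifyAux (m : Nat) : ∀ l : List Int, 2*m ≤ l.length →
    (∀ i, 0 < i → i < l.length → m ≤ (i-1)/2 → l.getD ((i-1)/2) 0 ≤ l.getD i 0) →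
    ((List.range m).reverse.foldl (fun h i => pvSiftup h i) l).Perm l
    ∧ ((List.range m).reverse.foldl (fun h i => pvSiftup h i) l).length = l.length
    ∧ pvIsHeap ((List.range m).reverse.foldl (fun h i => pvSiftup h i) l) := by
  induction m with
  | zero =>
    intro l _ h
    refine ⟨List.Perm.refl _, rfl, ?_⟩
    intro i h0 hilen
    exact h i h0 hilen (Nat.zero_le _)
  | succ m ihm =>
    intro l hml h
    rw [List.range_succ, List.reverse_append]
    simp only [List.reverse_singleton, List.singleton_append, List.foldl_cons]
    have hsu := pvSiftup_spec l m (by omega) ?_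
    · have := ihm (pvSiftup l m) (by omega) ?_
      · refine ⟨this.1.trans hsu.1, by rw [this.2.1, hsu.2.1], this.2.2⟩
      · intro i h0 hilen hmi
        exact hsu.2.2 i h0 (by omega) hmi
    · intro i h0 hilen hmi
      exact h i h0 hilen (by omega)

theorem pvHeapify_spec (x : List Int) :
    (pvHeapify x).Perm x ∧ (pvHeapify x).length = x.length ∧ pvIsHeap (pvHeapify x) := by
  unfold pvHeapify
  apply pvHeapifyAux
  · omega
  · intro i h0 hilen hmi
    omega
theorem pvHeappush_spec (heap : List Int) (x : Int) (hh : pvIsHeap heap) :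
    (pvHeappush heap x).Perm (x :: heap) ∧ (pvHeappush heap x).length = heap.length + 1
    ∧ pvIsHeap (pvHeappush heap x) := by
  have hGA : ∀ j, j < heap.length → (heap ++ [x]).getD j 0 = heap.getD j 0 := by
    intro j hj
    rw [List.getD_eq_getElem?_getD, List.getD_eq_getElem?_getD, List.getElem?_append_left hj]
  have hlen : heap.length < (heap ++ [x]).length := by simp
  have hsd := pvSiftdown_spec (heap ++ [x]) 0 heap.length hlen (pvDesc_zero _) ?_ ?_
  · unfold pvHeappush
    refine ⟨hsd.1.trans (List.perm_append_singleton _ _), by simpa using hsd.2.1, ?_⟩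
    intro i h0 hilen
    refine hsd.2.2 i h0 ?_ (Nat.zero_le _)
    rw [hsd.2.1] at hilen
    exact hilen
  · intro i h0 hilen hine _
    simp only [List.length_append, List.length_cons, List.length_nil] at hilen
    have hi' : i < heap.length := by omega
    rw [hGA _ (by omega), hGA _ hi']
    exact hh i h0 hi'
  · intro h0 c hclen hcpar
    simp only [List.length_append, List.length_cons, List.length_nil] at hclen
    omega

theorem pvHeap_root_min (l : List Int) (hh : pvIsHeap l) :
    ∀ i, i < l.length → l.getD 0 0 ≤ l.getD i 0 := by
  intro i
  induction i using Nat.strong_induction_on with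
  | _ i ih =>
    intro hilen
    rcases Nat.eq_zero_or_pos i with h0 | h0
    · subst h0; exact le_refl _
    · exact le_trans (ih ((i-1)/2) (by omega) (by omega)) (hh i h0 hilen)

theorem pvHeappopRest_nil_or (x : Int) : pvHeappopRest [x] = [] := by
  simp [pvHeappopRest]

theorem pvHeappopRest_spec (x : Int) (t : List Int) (hh : pvIsHeap (x :: t)) :
    (pvHeappopRest (x :: t)).Perm t ∧ pvIsHeap (pvHeappopRest (x :: t)) := by
  cases t with
  | nil =>
    rw [pvHeappopRest_nil_or]
    refine ⟨List.Perm.refl _, ?_⟩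
    intro i h0 hilen
    simp at hilen
  | cons y t' =>
    have hne : (y :: t' : List Int) ≠ [] := by simp
    have hL : (x :: y :: t').getLastD 0 = (y :: t').getLast hne := by
      rw [List.getLastD_eq_getLast?, List.getLast?_eq_some_getLast (by simp)]
      simp [List.getLast_cons]
    have hdl : (x :: y :: t').dropLast = x :: (y :: t').dropLast := by
      simp [List.dropLast_cons_of_ne_nil hne]
    have e : pvHeappopRest (x :: y :: t')
        = pvSiftup ((y :: t').getLast hne :: (y :: t').dropLast) 0 := by
      simp only [pvHeappopRest, hL, hdl, List.isEmpty_cons, Bool.false_eq_true, if_false,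
        List.set_cons_zero]
    rw [e]
    have hmid : ∀ j, 1 ≤ j → j < ((y :: t').getLast hne :: (y :: t').dropLast).length →
        ((y :: t').getLast hne :: (y :: t').dropLast).getD j 0 = (x :: y :: t').getD j 0 := by
      intro j h1 hj
      simp only [List.length_cons, List.length_dropLast] at hj
      obtain ⟨k, rfl⟩ : ∃ k, j = k + 1 := ⟨j - 1, by omega⟩
      rw [List.getD_eq_getElem?_getD, List.getD_eq_getElem?_getD]
      simp only [List.getElem?_cons_succ]
      rw [List.getElem?_dropLast]
      simp only [List.length_cons] at hj ⊢
      rw [if_pos (by omega)]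
    have hsu := pvSiftup_spec ((y :: t').getLast hne :: (y :: t').dropLast) 0 (by simp) ?_
    · constructor
      · refine hsu.1.trans ?_
        have heq : (y :: t').dropLast ++ [(y :: t').getLast hne] = y :: t' :=
          List.dropLast_append_getLast hne
        have hp : ((y :: t').getLast hne :: (y :: t').dropLast).Perm
            ((y :: t').dropLast ++ [(y :: t').getLast hne]) :=
          (List.perm_append_singleton _ _).symm
        rw [heq] at hp
        exact hp
      · intro i h0 hilen
        exact hsu.2.2 i h0 (by rw [hsu.2.1] at hilen; exact hilen) (Nat.zero_le _)
    · intro i h0 hilen hpar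
      rw [hmid i (by omega) hilen, hmid ((i-1)/2) (by omega) (by omega)]
      simp only [List.length_cons, List.length_dropLast, List.length_cons] at hilen
      exact hh i h0 (by simp; omega)


theorem pvInsort_perm (v : Int) (d : List Int) : (pvInsort d v).Perm (v :: d) := by
  induction d with
  | nil => simp [pvInsort]
  | cons x xs ih =>
    rw [pvInsort]
    split
    · exact ((ih.cons x).trans (List.Perm.swap v x xs)).symm.symm
    · exact List.Perm.refl _

theorem pvInsort_sorted (v : Int) (d : List Int) (h : d.Pairwise (· ≤ ·)) :
    (pvInsort d v).Pairwise (· ≤ ·) := by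
  induction d with
  | nil => simp [pvInsort]
  | cons x xs ih =>
    rw [List.pairwise_cons] at h
    rw [pvInsort]
    split
    · rename_i hxv
      rw [List.pairwise_cons]
      constructor
      · intro y hy
        rcases List.mem_cons.mp ((pvInsort_perm v xs).mem_iff.mp hy) with h' | h'
        · omega
        · exact h.1 y h'
      · exact ih h.2
    · rename_i hxv
      rw [List.pairwise_cons]
      constructor
      · intro y hy
        rcases List.mem_cons.mp hy with h' | h'
        · omega
        · have := h.1 y h'; omega
      · exact List.pairwise_cons.mpr h
theorem pvSorted_head_min (m : Int) (bt : List Int) (hs : (m :: bt).Pairwise (· ≤ ·)) :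
    ∀ y ∈ m :: bt, m ≤ y := by
  intro y hy
  rcases List.mem_cons.mp hy with h | h
  · omega
  · exact (List.pairwise_cons.mp hs).1 y h

theorem pvSorted_getLast_max (b : List Int) (hs : b.Pairwise (· ≤ ·)) (hne : b ≠ []) :
    ∀ y ∈ b, y ≤ b.getLast hne := by
  induction b with
  | nil => simp at hne
  | cons x bt ih =>
    intro y hy
    cases bt with
    | nil => simp at hy; simp [hy, List.getLast]
    | cons z bt' =>
      rw [List.getLast_cons (by simp)]
      rcases List.mem_cons.mp hy with h | h
      · subst h
        refine le_trans ((List.pairwise_cons.mp hs).1 _ (List.getLast_mem _)) (le_refl _)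
      · exact ih (List.pairwise_cons.mp hs).2 (by simp) y h

theorem pvHeap_root_min_mem (l : List Int) (hh : pvIsHeap l) :
    ∀ y ∈ l, l.getD 0 0 ≤ y := by
  intro y hy
  obtain ⟨i, hi, rfl⟩ := List.mem_iff_getElem.mp hy
  have h := pvHeap_root_min l hh i hi
  rw [List.getD_eq_getElem?_getD (l := l) (i := i), List.getElem?_eq_getElem hi] at h
  exact h

def pvInv (a b : List Int) : Prop :=
  pvIsHeap a ∧ a.Perm b ∧ b.Pairwise (· ≤ ·)
theorem pvInv_nil : pvInv [] [] := by
  refine ⟨?_, List.Perm.refl _, by simp⟩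
  intro i h0 hilen
  simp at hilen

theorem pvD1_core (a b : List Int) (_hh : pvIsHeap a) (hp : a.Perm b)
    (hs : b.Pairwise (· ≤ ·)) (hane : a ≠ []) :
    pvInv (pvHeapify ((pvHeappopRest (pvHeapify (a.map (fun x => -x)))).map (fun x => -x)))
      b.dropLast := by
  have hbne : b ≠ [] := by
    intro hb; subst hb; exact hane hp.eq_nil
  obtain ⟨hp1, hl1, hh1⟩ := pvHeapify_spec (a.map (fun x => -x))
  obtain ⟨w, t1, he1⟩ : ∃ w t1, pvHeapify (a.map (fun x => -x)) = w :: t1 := by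
    cases hc : pvHeapify (a.map (fun x => -x)) with
    | nil =>
      exfalso
      rw [hc] at hl1
      simp at hl1
      exact hane (List.eq_nil_of_length_eq_zero hl1.symm)
    | cons w t1 => exact ⟨w, t1, rfl⟩
  obtain ⟨hp2, hh2⟩ := pvHeappopRest_spec w t1 (he1 ▸ hh1)
  obtain ⟨hp3, hl3, hh3⟩ :=
    pvHeapify_spec ((pvHeappopRest (pvHeapify (a.map (fun x => -x)))).map (fun x => -x))
  refine ⟨hh3, ?_, hs.sublist (List.dropLast_sublist _)⟩
  have hLb := pvSorted_getLast_max b hs hbne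
  have hbsplit : b.dropLast ++ [b.getLast hbne] = b := List.dropLast_append_getLast hbne
  have hw_min : ∀ y ∈ pvHeapify (a.map (fun x => -x)), w ≤ y := by
    intro y hy
    have h := pvHeap_root_min_mem _ hh1 y hy
    rw [he1] at h
    simpa using h
  have hmemneg : (-(b.getLast hbne)) ∈ pvHeapify (a.map (fun x => -x)) := by
    refine hp1.mem_iff.mpr ?_
    exact List.mem_map_of_mem (hp.mem_iff.mpr (List.getLast_mem hbne))
  have h2le : -(b.getLast hbne) ≤ w := by
    have hwmem : w ∈ a.map (fun x => -x) :=
      hp1.mem_iff.mp (by rw [he1]; exact List.mem_cons_self)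
    obtain ⟨z, hz, hzw⟩ := List.mem_map.mp hwmem
    have hzb := hLb z (hp.mem_iff.mp hz)
    omega
  have hw : w = -(b.getLast hbne) := le_antisymm (hw_min _ hmemneg) h2le
  have hchain : (w :: t1).Perm ((-(b.getLast hbne)) :: (b.dropLast.map (fun x => -x))) := by
    have h1 : (w :: t1).Perm (b.map (fun x => -x)) := by
      rw [← he1]; exact hp1.trans (hp.map _)
    have hb2 : (b.map (fun x => -x)).Perm
        ((-(b.getLast hbne)) :: (b.dropLast.map (fun x => -x))) := by
      conv_lhs => rw [← hbsplit]
      rw [List.map_append]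
      simp [List.perm_append_singleton]
    exact h1.trans hb2
  have ht1 : t1.Perm (b.dropLast.map (fun x => -x)) := by
    rw [hw] at hchain
    exact hchain.cons_inv
  refine hp3.trans ?_
  have : ((pvHeappopRest (pvHeapify (a.map (fun x => -x)))).map (fun x => -x)).Perm
      ((b.dropLast.map (fun x => -x)).map (fun x => -x)) := by
    refine List.Perm.map _ ?_
    rw [he1]
    exact hp2.trans ht1
  refine this.trans ?_
  rw [List.map_map]
  simp

theorem pvDm1_core (a b : List Int) (hh : pvIsHeap a) (hp : a.Perm b)
    (hs : b.Pairwise (· ≤ ·)) (hane : a ≠ []) :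
    pvInv (pvHeappopRest a) b.tail := by
  obtain ⟨x, ta, rfl⟩ : ∃ x ta, a = x :: ta := by
    cases a with
    | nil => exact absurd rfl hane
    | cons x ta => exact ⟨x, ta, rfl⟩
  have hbne : b ≠ [] := by
    intro hb; subst hb; exact hane hp.eq_nil
  obtain ⟨m, bt, rfl⟩ : ∃ m bt, b = m :: bt := by
    cases b with
    | nil => exact absurd rfl hbne
    | cons m bt => exact ⟨m, bt, rfl⟩
  obtain ⟨hp2, hh2⟩ := pvHeappopRest_spec x ta hh
  have hxm : x = m := by
    have hxmin : ∀ y ∈ x :: ta, x ≤ y := by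
      have h := pvHeap_root_min_mem _ hh
      simpa using h
    have hmmin := pvSorted_head_min m bt hs
    have h1 : x ≤ m := hxmin m (hp.mem_iff.mpr List.mem_cons_self)
    have h2 : m ≤ x := hmmin x (hp.mem_iff.mp List.mem_cons_self)
    omega
  have hta : ta.Perm bt := by
    rw [hxm] at hp
    exact hp.cons_inv
  exact ⟨hh2, by simpa using hp2.trans hta, (List.pairwise_cons.mp hs).2⟩

theorem pvStep_inv (a b : List Int) (i : String) (h : pvInv a b) :
    pvInv (pvStepA a i) (pvStepB b i) := by
  obtain ⟨hh, hp, hs⟩ := h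
  have hlen : a.length = b.length := hp.length_eq
  rw [pvStepA, pvStepB]
  by_cases hi1 : i = "D 1"
  · subst hi1
    simp only [BEq.rfl, Bool.true_and, if_true, show (("D 1" : String) == "D -1") = false by decide,
      Bool.false_and, Bool.false_eq_true, if_false,
      show (PySem.Str.pyGet? "D 1" 0 == some 'I') = false by decide]
    by_cases hae : a.isEmpty
    · have ha : a = [] := List.isEmpty_iff.mp hae
      have hb : b = [] := by subst ha; exact hp.symm.eq_nil
      subst ha hb
      simp only [List.isEmpty_nil, Bool.not_true, Bool.false_eq_true, if_false,
        List.dropLast_nil]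
      exact pvInv_nil
    · have hae' : a.isEmpty = false := by simpa using hae
      simp only [hae', Bool.not_false, if_true]
      exact pvD1_core a b hh hp hs (by simpa using hae)
  · have e1 : (i == "D 1") = false := by simpa using hi1
    simp only [e1, Bool.false_and, Bool.false_eq_true, if_false]
    by_cases hi2 : i = "D -1"
    · subst hi2
      simp only [BEq.rfl, Bool.true_and, if_true,
        show (PySem.Str.pyGet? "D -1" 0 == some 'I') = false by decide]
      by_cases hae : a.isEmpty
      · have ha : a = [] := List.isEmpty_iff.mp hae
        have hb : b = [] := by subst ha; exact hp.symm.eq_nil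
        subst ha hb
        simp only [List.isEmpty_nil, Bool.not_true, Bool.false_eq_true, if_false,
          List.tail_nil]
        exact ⟨hh, hp, hs⟩
      · have hae' : a.isEmpty = false := by simpa using hae
        simp only [hae', Bool.not_false, if_true]
        exact pvDm1_core a b hh hp hs (by simpa using hae)
    · have e2 : (i == "D -1") = false := by simpa using hi2
      simp only [e2, Bool.false_and, Bool.false_eq_true, if_false]
      by_cases hI : (PySem.Str.pyGet? i 0 == some 'I') = true
      · simp only [hI, if_true]
        obtain ⟨hp4, _, hh4⟩ :=
          pvHeappush_spec a ((PySem.Int.ofStr? (PySem.Str.slice i (some 2) none)).getD 0) hh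
        refine ⟨hh4, ?_, pvInsort_sorted _ b hs⟩
        exact hp4.trans ((hp.cons _).trans (pvInsort_perm _ b).symm)
      · have hI' : (PySem.Str.pyGet? i 0 == some 'I') = false := by simpa using hI
        simp only [hI', Bool.false_eq_true, if_false]
        exact ⟨hh, hp, hs⟩
theorem pvFold_inv (ops : List String) : ∀ a b, pvInv a b →
    pvInv (ops.foldl pvStepA a) (ops.foldl pvStepB b) := by
  induction ops with
  | nil => intro a b h; exact h
  | cons o rest ih =>
    intro a b h
    simp only [List.foldl_cons]
    exact ih _ _ (pvStep_inv a b o h)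

theorem pvOut (a b : List Int) (hp : a.Perm b) (hs : b.Pairwise (· ≤ ·)) :
    (match PySem.List.max? a (fun x => x), PySem.List.min? a (fun x => x) with
     | some mx, some mn => ([mx, mn] : List Int)
     | _, _ => [0, 0])
    = if b.isEmpty then [0, 0] else [b.getLastD 0, b.headD 0] := by
  cases hb : b with
  | nil =>
    subst hb
    have ha : a = [] := hp.eq_nil
    subst ha
    rfl
  | cons m bt =>
    subst hb
    have hane : a ≠ [] := by
      intro h
      rw [h] at hp
      exact (by simp : (m :: bt : List Int) ≠ []) hp.symm.eq_nil
    cases hM : PySem.List.max? a (fun x => x) with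
    | none => exact absurd ((PySem.List.max?_eq_none_iff a _).mp hM) hane
    | some M =>
      cases hm : PySem.List.min? a (fun x => x) with
      | none => exact absurd ((PySem.List.min?_eq_none_iff a _).mp hm) hane
      | some mn =>
        simp only [List.isEmpty_cons, Bool.false_eq_true, if_false]
        have hbne : (m :: bt : List Int) ≠ [] := by simp
        have hgl : (m :: bt).getLastD 0 = (m :: bt).getLast hbne := by
          rw [List.getLastD_eq_getLast?, List.getLast?_eq_some_getLast hbne]
          rfl
        have hMax := PySem.List.max?_isMax hM
        have hMmem := PySem.List.max?_mem hM
        have hmin := PySem.List.min?_isMin hm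
        have hmmem := PySem.List.min?_mem hm
        have hML : M = (m :: bt).getLastD 0 := by
          rw [hgl]
          refine le_antisymm ?_ ?_
          · exact pvSorted_getLast_max _ hs hbne M (hp.mem_iff.mp hMmem)
          · exact hMax _ (hp.mem_iff.mpr (List.getLast_mem hbne))
        have hmh : mn = (m :: bt).headD 0 := by
          simp only [List.headD_cons]
          refine le_antisymm ?_ ?_
          · exact hmin m (hp.mem_iff.mpr List.mem_cons_self)
          · exact pvSorted_head_min m bt hs mn (hp.mem_iff.mp hmmem)
        rw [hML, hmh]

theorem pvMain (ops : List String) : solution ops = solution_alt ops := by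
  obtain ⟨hh, hp, hs⟩ := pvFold_inv ops [] [] pvInv_nil
  simp only [solution, solution_alt]
  exact pvOut _ _ hp hs

-- ===== VERDICT (by name: the statement is the Claim_ definition above) =====
theorem solution_spec : Claim_equal_solution := by
  intro operations _hdom _hpre
  exact pvMain operations
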